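-- pv_equiv track=rewrite | github.com/upesacm/21DaysOfCode-2023 | Python/Supragya/Day7_quiz1_Q3.py | check_triplet
-- ===== SOURCE A (Python) =====
-- def check_triplet(a, b, c):
--     if a == 0 or b == 0 or c == 0:
--         return False
--
--     for x in range(1, c + 1):
--         if x % a == 0:
--             for y in range(1, c + 1):
--                 if y % b == 0:
--                     for z in range(1, c + 1):
--                         if z % c == 0 and x + y > z:
--                             return True
--     return False
-- ===== SOURCE B (Python) =====
-- def check_triplet(a, b, c):
--     # closed form: the triple loops only ever succeed with z == c, and the best
--     # candidates are the largest multiples of |a| and |b| not exceeding c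
--     if a == 0 or b == 0 or c <= 0:
--         return False
--     x = (c // abs(a)) * abs(a)
--     y = (c // abs(b)) * abs(b)
--     return x >= 1 and y >= 1 and x + y > c
-- ===== Notes on version B (the rewrite author's own statement) =====
-- stated objective: faster
-- what changed: Replaced the O(c^3) triple loop by an O(1) closed form: z can only be c, so the check reduces to whether the largest multiples of |a| and |b| that are <= c exist and sum to more than c.
import Mathlib
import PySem

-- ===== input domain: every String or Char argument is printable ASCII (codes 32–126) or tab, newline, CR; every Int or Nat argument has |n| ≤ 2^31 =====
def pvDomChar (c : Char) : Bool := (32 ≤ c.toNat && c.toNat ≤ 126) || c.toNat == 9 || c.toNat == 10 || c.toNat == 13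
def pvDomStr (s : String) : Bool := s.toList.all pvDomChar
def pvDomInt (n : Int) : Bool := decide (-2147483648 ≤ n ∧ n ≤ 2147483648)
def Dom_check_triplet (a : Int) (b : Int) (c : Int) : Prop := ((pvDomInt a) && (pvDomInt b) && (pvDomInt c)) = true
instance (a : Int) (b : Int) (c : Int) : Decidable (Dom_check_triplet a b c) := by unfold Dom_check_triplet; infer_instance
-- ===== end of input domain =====

-- B replaces A's O(c^3) triple loop by a closed form (largest multiples of |a|,|b| ≤ c); objective: faster.


-- ===== PORT A =====
-- literal transliteration: each 'for … return True' loop is a List.any over range(1, c+1)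
def check_triplet (a : Int) (b : Int) (c : Int) : Bool :=
  if a = 0 ∨ b = 0 ∨ c = 0 then false
  else
    (PySem.List.pyRange 1 (c + 1) 1).any (fun x =>
      decide (PySem.Int.mod x a = 0) &&
      (PySem.List.pyRange 1 (c + 1) 1).any (fun y =>
        decide (PySem.Int.mod y b = 0) &&
        (PySem.List.pyRange 1 (c + 1) 1).any (fun z =>
          decide (PySem.Int.mod z c = 0) && decide (x + y > z))))

-- ===== PORT B =====
def check_triplet_alt (a : Int) (b : Int) (c : Int) : Bool :=
  if a = 0 ∨ b = 0 ∨ c ≤ 0 then false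
  else
    let x := PySem.Int.floordiv c |a| * |a|
    let y := PySem.Int.floordiv c |b| * |b|
    decide (x ≥ 1) && decide (y ≥ 1) && decide (x + y > c)

-- ===== PRECONDITION & SPEC =====
def Spec_check_triplet (a : Int) (b : Int) (c : Int) (out : Bool) : Prop := out = check_triplet_alt a b c
instance (a : Int) (b : Int) (c : Int) (out : Bool) : Decidable (Spec_check_triplet a b c out) := by unfold Spec_check_triplet; infer_instance

-- ===== CLAIM (what is proved, stated in full; the proofs are below) =====
def Claim_equal_check_triplet : Prop := ∀ (a : Int) (b : Int) (c : Int), Dom_check_triplet a b c → Spec_check_triplet a b c (check_triplet a b c)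

-- ===== LEMMAS AND PROOFS =====

-- the largest multiple of |a| not exceeding c, for c > 0, a ≠ 0
theorem best_mult (a c : Int) (ha : a ≠ 0) (hc : 0 < c) :
    a ∣ (PySem.Int.floordiv c |a| * |a|) ∧
    PySem.Int.floordiv c |a| * |a| ≤ c ∧
    (∀ x : Int, x ≤ c → a ∣ x → x ≤ PySem.Int.floordiv c |a| * |a|) ∧
    ((1 : Int) ≤ PySem.Int.floordiv c |a| * |a| ↔ |a| ≤ c) := by
  have hpa : (0:Int) < |a| := abs_pos.mpr ha
  set f := PySem.Int.floordiv c |a| with hf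
  refine ⟨?_, ?_, ?_, ?_⟩
  · exact (abs_dvd a _).mp ⟨f, mul_comm f |a|⟩
  · exact (PySem.Int.le_floordiv_iff_mul_le hpa).mp le_rfl
  · intro x hx hdvd
    obtain ⟨k, hk⟩ := (abs_dvd a x).mpr hdvd
    have hk' : k * |a| ≤ c := by rw [mul_comm k]; omega
    have : k ≤ f := (PySem.Int.le_floordiv_iff_mul_le hpa).mpr hk'
    calc x = k * |a| := by rw [hk, mul_comm]
      _ ≤ f * |a| := by exact mul_le_mul_of_nonneg_right this hpa.le
  · constructor
    · intro h1
      have hf1 : 1 ≤ f := by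
        by_contra hne
        have : f ≤ 0 := by omega
        have : f * |a| ≤ 0 := mul_nonpos_of_nonpos_of_nonneg this hpa.le
        omega
      calc |a| = 1 * |a| := (one_mul _).symm
        _ ≤ f * |a| := mul_le_mul_of_nonneg_right hf1 hpa.le
        _ ≤ c := (PySem.Int.le_floordiv_iff_mul_le hpa).mp le_rfl
    · intro hac
      have hf1 : 1 ≤ f := (PySem.Int.le_floordiv_iff_mul_le hpa).mpr (by omega)
      calc (1:Int) ≤ |a| := hpa
        _ = 1 * |a| := (one_mul _).symm
        _ ≤ f * |a| := mul_le_mul_of_nonneg_right hf1 hpa.le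

-- the z-loop succeeds iff x + y > c (z must equal c)
theorem z_loop (x y c : Int) (hc : 0 < c) :
    (∃ z : Int, (1 ≤ z ∧ z < c + 1) ∧ c ∣ z ∧ x + y > z) ↔ x + y > c := by
  constructor
  · rintro ⟨z, ⟨h1, h2⟩, ⟨k, hk⟩, h3⟩
    have hk1 : 1 ≤ k := by nlinarith
    have : c ≤ z := by nlinarith
    omega
  · intro h
    exact ⟨c, ⟨by omega, by omega⟩, dvd_refl c, h⟩

theorem main_pos (a b c : Int) (ha : a ≠ 0) (hb : b ≠ 0) (hc : 0 < c) :
    check_triplet a b c = check_triplet_alt a b c := by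
  obtain ⟨hda, hla, hmaxa, hia⟩ := best_mult a c ha hc
  obtain ⟨hdb, hlb, hmaxb, hib⟩ := best_mult b c hb hc
  set ma := PySem.Int.floordiv c |a| * |a| with hma
  set mb := PySem.Int.floordiv c |b| * |b| with hmb
  unfold check_triplet check_triplet_alt
  rw [if_neg (by push Not; exact ⟨ha, hb, hc.ne'⟩), if_neg (by push Not; exact ⟨ha, hb, by omega⟩)]
  rw [Bool.eq_iff_iff]
  simp only [List.any_eq_true, Bool.and_eq_true, decide_eq_true_eq,
    PySem.List.mem_pyRange_one, PySem.Int.mod_eq_zero_iff_dvd, ← hma, ← hmb]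
  constructor
  · rintro ⟨x, ⟨hx1, hx2⟩, hxa, y, ⟨hy1, hy2⟩, hyb, hz⟩
    have hz' := (z_loop x y c hc).mp (by
      obtain ⟨z, hzm, hzc, hzgt⟩ := hz
      exact ⟨z, hzm, hzc, hzgt⟩)
    have hxm : x ≤ ma := hmaxa x (by omega) hxa
    have hym : y ≤ mb := hmaxb y (by omega) hyb
    exact ⟨⟨by omega, by omega⟩, by omega⟩
  · rintro ⟨⟨h1, h2⟩, h3⟩
    refine ⟨ma, ⟨h1, by omega⟩, hda, mb, ⟨h2, by omega⟩, hdb, ?_⟩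
    exact (z_loop ma mb c hc).mpr h3

-- ===== VERDICT (by name: the statement is the Claim_ definition above) =====
theorem check_triplet_spec : Claim_equal_check_triplet := by
  intro a b c _
  unfold Spec_check_triplet
  by_cases ha : a = 0
  · simp [check_triplet, check_triplet_alt, ha]
  by_cases hb : b = 0
  · simp [check_triplet, check_triplet_alt, hb]
  by_cases hc : 0 < c
  · exact main_pos a b c ha hb hc
  · -- c ≤ 0: A's outer range is empty (or the c = 0 guard fires); B's guard fires
    by_cases hc0 : c = 0
    · simp [check_triplet, check_triplet_alt, hc0]
    · have hcneg : c + 1 ≤ 1 := by omega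
      simp [check_triplet, check_triplet_alt, ha, hb, hc0,
        PySem.List.pyRange_one_eq_nil hcneg, show c ≤ 0 by omega]
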